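-- pv_equiv track=rewrite | github.com/limproda/LeetCode_Python | Problems/14. Longest Common Prefix.py | tryIt
-- ===== SOURCE A (Python) =====
-- def tryIt(strs, letter, numeroPalabra):
--     try:
--         if numeroPalabra >= len(strs):
--             return True
--         elif strs[0][letter] == strs[numeroPalabra][letter]:
--             return tryIt(strs, letter, numeroPalabra+1)
--         else:
--             return False
--     except:
--         return False
-- ===== SOURCE B (Python) =====
-- def tryIt(strs, letter, numeroPalabra):
--     try:
--         for i in range(numeroPalabra, len(strs)):
--             if strs[0][letter] != strs[i][letter]:
--                 return False
--         return True
--     except: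
--         return False
-- ===== Notes on version B (the rewrite author's own statement) =====
-- stated objective: simpler
-- what changed: Replaces the self-recursion (one Python call frame per word) with a single explicit for-loop over range(numeroPalabra, len(strs)) inside the same try/except.
import Mathlib
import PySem

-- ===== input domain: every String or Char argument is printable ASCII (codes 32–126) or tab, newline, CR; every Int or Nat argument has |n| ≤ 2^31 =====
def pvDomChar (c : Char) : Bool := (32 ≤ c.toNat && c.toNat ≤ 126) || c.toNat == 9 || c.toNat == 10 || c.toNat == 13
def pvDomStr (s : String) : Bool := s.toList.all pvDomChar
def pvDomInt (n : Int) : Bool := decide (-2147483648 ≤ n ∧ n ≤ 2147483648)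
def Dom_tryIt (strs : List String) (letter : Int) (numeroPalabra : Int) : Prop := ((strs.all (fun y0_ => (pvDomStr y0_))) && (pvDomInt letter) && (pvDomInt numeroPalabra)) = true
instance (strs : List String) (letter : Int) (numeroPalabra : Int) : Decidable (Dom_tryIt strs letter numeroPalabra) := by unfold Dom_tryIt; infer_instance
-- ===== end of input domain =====

-- B replaces A's self-recursion by an explicit loop over range(numeroPalabra, len(strs)) inside the same try/except (simpler decomposition; same O(n) cost, return value proved equal for all inputs).


-- ===== PORT A =====
-- A's bare `except: return False` makes it total: any IndexError (a pyGet? returning none) yields false.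
def tryIt (strs : List String) (letter : Int) (numeroPalabra : Int) : Bool :=
  if numeroPalabra ≥ (strs.length : Int) then true
  else
    match PySem.List.pyGet? strs 0 with
    | none => false
    | some s0 =>
      match PySem.Str.pyGet? s0 letter with
      | none => false
      | some c0 =>
        match PySem.List.pyGet? strs numeroPalabra with
        | none => false
        | some sn =>
          match PySem.Str.pyGet? sn letter with
          | none => false
          | some cn => if c0 == cn then tryIt strs letter (numeroPalabra + 1) else false
termination_by ((strs.length : Int) - numeroPalabra).toNat
decreasing_by omega

-- ===== PORT B =====
-- `for i in range(numeroPalabra, len(strs))`: Python's range is lazy, so the loop is ported as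
-- recursion on the remaining iteration count (len(strs) - i).toNat with i the running index;
-- a failed index lookup (pyGet? = none) is the caught exception = return False.
def tryItLoop (strs : List String) (letter : Int) : Nat → Int → Bool
  | 0, _ => true
  | fuel + 1, i =>
    match (PySem.List.pyGet? strs 0).bind (fun s0 => PySem.Str.pyGet? s0 letter),
          (PySem.List.pyGet? strs i).bind (fun si => PySem.Str.pyGet? si letter) with
    | some c0, some ci => if c0 != ci then false else tryItLoop strs letter fuel (i + 1)
    | _, _ => false

def tryIt_alt (strs : List String) (letter : Int) (numeroPalabra : Int) : Bool :=
  tryItLoop strs letter ((strs.length : Int) - numeroPalabra).toNat numeroPalabra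

-- ===== PRECONDITION & SPEC =====
def Spec_tryIt (strs : List String) (letter : Int) (numeroPalabra : Int) (out : Bool) : Prop := out = tryIt_alt strs letter numeroPalabra
instance (strs : List String) (letter : Int) (numeroPalabra : Int) (out : Bool) : Decidable (Spec_tryIt strs letter numeroPalabra out) := by unfold Spec_tryIt; infer_instance

-- ===== CLAIM (what is proved, stated in full; the proofs are below) =====
def Claim_equal_tryIt : Prop := ∀ (strs : List String) (letter : Int) (numeroPalabra : Int), Dom_tryIt strs letter numeroPalabra → Spec_tryIt strs letter numeroPalabra (tryIt strs letter numeroPalabra)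

-- ===== LEMMAS AND PROOFS =====
theorem tryIt_eq_loop (strs : List String) (letter : Int) (fuel : Nat) (numeroPalabra : Int)
    (hf : fuel = ((strs.length : Int) - numeroPalabra).toNat) :
    tryIt strs letter numeroPalabra = tryItLoop strs letter fuel numeroPalabra := by
  induction fuel generalizing numeroPalabra with
  | zero =>
    have h : numeroPalabra ≥ (strs.length : Int) := by omega
    unfold tryIt
    simp [h, tryItLoop]
  | succ fuel ih =>
    have h : numeroPalabra < (strs.length : Int) := by omega
    unfold tryIt
    simp only [not_le.mpr h]
    cases h0 : PySem.List.pyGet? strs 0 with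
    | none => simp [tryItLoop, h0]
    | some s0 =>
      cases hc0 : PySem.List.pyGet? s0.toList letter with
      | none => simp [tryItLoop, PySem.Str.pyGet?, h0, hc0]
      | some c0 =>
        cases hn : PySem.List.pyGet? strs numeroPalabra with
        | none => simp [tryItLoop, PySem.Str.pyGet?, h0, hc0, hn]
        | some sn =>
          cases hcn : PySem.List.pyGet? sn.toList letter with
          | none => simp [tryItLoop, PySem.Str.pyGet?, h0, hc0, hn, hcn]
          | some cn =>
            by_cases he : c0 = cn
            · subst he
              simp only [tryItLoop, PySem.Str.pyGet?, PySem.Chars.pyGet?_eq_listPyGet?, h0, hc0,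
                hn, hcn, Option.bind_some, bne_self_eq_false, Bool.false_eq_true, if_false]
              rw [if_pos (by simp)]
              exact ih (numeroPalabra + 1) (by omega)
            · simp [tryItLoop, PySem.Str.pyGet?, h0, hc0, hn, hcn, he]

-- ===== VERDICT (by name: the statement is the Claim_ definition above) =====
theorem tryIt_spec : Claim_equal_tryIt := by
  intro strs letter numeroPalabra _
  unfold Spec_tryIt tryIt_alt
  exact tryIt_eq_loop strs letter _ numeroPalabra rfl
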